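-- pv_equiv track=rewrite | github.com/nitekat1124/advent-of-code-2016 | solutions/day14.py | is_key
-- ===== SOURCE A (Python) =====
-- def is_key(key):
--     c = None
--     for i in range(len(key) - 2):
--         if key[i] * 3 == key[i : i + 3]:
--             c = key[i] * 5
--             break
--     if c is None:
--         return False, None
--     else:
--         return True, c
-- ===== SOURCE B (Python) =====
-- def is_key(key):
--     # Stage 1: run-length encode the string.
--     runs = []
--     i = 0
--     while i < len(key):
--         j = i
--         while j < len(key) and key[j] == key[i]:
--             j += 1
--         runs.append((key[i], j - i))
--         i = j
--     # Stage 2: the first run of length >= 3 decides the answer.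
--     for ch, n in runs:
--         if n >= 3:
--             return True, ch * 5
--     return False, None
-- ===== Notes on version B (the rewrite author's own statement) =====
-- stated objective: alternative
-- what changed: Replaces the triple-window scan (comparing key[i]*3 against a fresh 3-char slice with a sentinel and break) by a two-stage algorithm: first run-length encode the whole string into (char, count) runs, then return the first run whose count is at least 3.
import Mathlib
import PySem

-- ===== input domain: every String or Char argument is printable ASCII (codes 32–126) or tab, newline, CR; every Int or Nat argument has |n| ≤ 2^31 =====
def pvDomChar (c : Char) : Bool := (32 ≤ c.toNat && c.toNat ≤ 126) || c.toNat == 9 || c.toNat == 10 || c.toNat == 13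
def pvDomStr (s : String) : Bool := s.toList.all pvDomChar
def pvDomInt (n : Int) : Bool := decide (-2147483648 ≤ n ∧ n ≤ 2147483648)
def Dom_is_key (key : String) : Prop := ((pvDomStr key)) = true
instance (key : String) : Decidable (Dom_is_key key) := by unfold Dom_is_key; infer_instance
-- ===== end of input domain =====

-- B replaces A's triple-window scan by a two-stage algorithm: run-length encode the
-- string, then return the first run of length >= 3 (alternative; same cost).

-- ===== PORT A =====
-- the for-loop with break: recursion over the range list, carrying the early exit as Option
def isKeyLoopA (cs : List Char) : List Int → Option (List Char)
  | [] => none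
  | i :: rest =>
    match PySem.List.pyGet? cs i with
    | none => none  -- unreachable: i ranges over [0, len-2)
    | some ch =>
      if List.replicate 3 ch = PySem.List.slice cs (some i) (some (i + 3)) then
        some (List.replicate 5 ch)   -- c = key[i] * 5; break
      else isKeyLoopA cs rest

def is_key (key : String) : Bool × Option String :=
  match isKeyLoopA key.toList (PySem.List.pyRange 0 (PySem.Str.len key - 2) 1) with
  | none => (false, none)
  | some c => (true, some (String.ofList c))

-- ===== PORT B =====
-- inner while: j starts at i and advances while key[j] == key[i]; run length j - i
-- equals 1 + (number of further chars equal to the run's first char)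
def runLen (a : Char) : List Char → Nat
  | [] => 0
  | b :: rest => if b = a then 1 + runLen a rest else 0

-- outer while: append the run (key[i], j - i), continue at i = j (the suffix past the run)
def runsB : List Char → List (Char × Nat)
  | [] => []
  | a :: rest => (a, 1 + runLen a rest) :: runsB (rest.drop (runLen a rest))
termination_by cs => cs.length
decreasing_by
  simp only [List.length_cons, List.length_drop]; omega

-- stage 2: first run with n >= 3 wins, else (False, None)
def is_key_alt (key : String) : Bool × Option String :=
  match (runsB key.toList).find? (fun r => decide (3 ≤ r.2)) with
  | none => (false, none)
  | some r => (true, some (String.ofList (List.replicate 5 r.1)))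

-- ===== PRECONDITION & SPEC =====
def Spec_is_key (key : String) (out : Bool × Option String) : Prop := out = is_key_alt key
instance (key : String) (out : Bool × Option String) : Decidable (Spec_is_key key out) := by unfold Spec_is_key; infer_instance

-- ===== CLAIM (what is proved, stated in full; the proofs are below) =====
def Claim_equal_is_key : Prop := ∀ (key : String), Dom_is_key key → Spec_is_key key (is_key key)

-- ===== LEMMAS AND PROOFS =====

-- common characterization: the first char starting a run of three equal chars
def trip : List Char → Option Char
  | a :: b :: c :: rest => if a = b ∧ a = c then some a else trip (b :: c :: rest)
  | _ => none

theorem trip_short (l : List Char) (h : l.length < 3) : trip l = none := by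
  match l, h with
  | [], _ => rfl
  | [_], _ => rfl
  | [_, _], _ => rfl

theorem trip_cons_ne (a b : Char) (t : List Char) (h : a ≠ b) :
    trip (a :: b :: t) = trip (b :: t) := by
  cases t with
  | nil => rfl
  | cons c t' =>
    simp only [trip]
    rw [if_neg (fun hc => h hc.1)]

theorem runLen_ge_two {a : Char} {rest : List Char} (h : 2 ≤ runLen a rest) :
    ∃ t, rest = a :: a :: t := by
  cases rest with
  | nil => simp [runLen] at h
  | cons b t =>
    by_cases hb : b = a
    · subst hb
      cases t with
      | nil => simp [runLen] at h
      | cons c t' =>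
        by_cases hc : c = b
        · subst hc; exact ⟨t', rfl⟩
        · simp [runLen, hc] at h
    · simp [runLen, hb] at h

-- B's side: the first long run of the run-length encoding computes trip
theorem runsB_find_eq_trip (cs : List Char) :
    ((runsB cs).find? (fun r => decide (3 ≤ r.2))).map Prod.fst = trip cs := by
  match cs with
  | [] => simp only [runsB, List.find?_nil, Option.map_none]; rfl
  | a :: rest =>
    rw [show runsB (a :: rest) = (a, 1 + runLen a rest) :: runsB (rest.drop (runLen a rest)) from by
          rw [runsB],
        List.find?_cons]
    by_cases h3 : 3 ≤ 1 + runLen a rest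
    · obtain ⟨t, ht⟩ := runLen_ge_two (a := a) (rest := rest) (by omega)
      subst ht
      rw [decide_eq_true h3]
      simp [trip]
    · rw [decide_eq_false h3]
      have ih := runsB_find_eq_trip (rest.drop (runLen a rest))
      rw [ih]
      cases rest with
      | nil => rfl
      | cons b t =>
        by_cases hb : b = a
        · subst hb
          have h3' : ¬ 3 ≤ 1 + runLen b (b :: t) := h3
          have ht0 : runLen b t = 0 := by
            simp [runLen] at h3'; omega
          have hr : runLen b (b :: t) = 1 := by simp [runLen, ht0]
          rw [hr, List.drop_succ_cons, List.drop_zero]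
          cases t with
          | nil => rfl
          | cons c t' =>
            have hc : c ≠ b := fun h => by simp [runLen, h] at ht0
            rw [show trip (b :: b :: c :: t') = trip (b :: c :: t') from by
                  simp only [trip]
                  rw [if_neg (fun hx => hc hx.2.symm)],
                trip_cons_ne b c t' (fun h => hc h.symm)]
        · have hr : runLen a (b :: t) = 0 := by simp [runLen, hb]
          rw [hr, List.drop_zero, trip_cons_ne a b t (fun h => hb h.symm)]
termination_by cs.length
decreasing_by simp only [List.length_cons, List.length_drop]; omega

-- A's side: the indexed loop over range(i, n-2) computes trip on the suffix from i
theorem loopA_eq_trip (cs : List Char) (i : Nat) :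
    isKeyLoopA cs (PySem.List.pyRange i ((cs.length : Int) - 2) 1)
      = (trip (cs.drop i)).map (fun a => List.replicate 5 a) := by
  by_cases h : (i : Int) < (cs.length : Int) - 2
  · have hi2 : i + 2 < cs.length := by omega
    have hi1 : i + 1 < cs.length := by omega
    have hi0 : i < cs.length := by omega
    rw [PySem.List.pyRange_one_cons h]
    have hdrop1 : cs.drop (i + 1) = cs[i+1] :: cs[i+2] :: cs.drop (i+3) := by
      rw [List.drop_eq_getElem_cons hi1, List.drop_eq_getElem_cons hi2]
    have hdrop : cs.drop i = cs[i] :: cs[i+1] :: cs[i+2] :: cs.drop (i+3) := by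
      rw [List.drop_eq_getElem_cons hi0, hdrop1]
    have hget : PySem.List.pyGet? cs (i : Int) = some cs[i] := by
      simp [hi0]
    have hslice : PySem.List.slice cs (some (i : Int)) (some ((i : Int) + 3)) =
        [cs[i], cs[i+1], cs[i+2]] := by
      have h3 : ((i : Int) + 3) = ((i : Int) + ((3 : Nat) : Int)) := by norm_num
      rw [h3, PySem.List.slice_natCast_add, hdrop]
      rfl
    rw [hdrop]
    simp only [isKeyLoopA, hget, hslice, trip]
    by_cases he : cs[i] = cs[i+1] ∧ cs[i] = cs[i+2]
    · obtain ⟨h1, h2⟩ := he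
      rw [if_pos (by rw [← h1, ← h2]; rfl), if_pos ⟨h1, h2⟩]
      rfl
    · rw [if_neg (by
        intro hc
        have : [cs[i], cs[i], cs[i]] = [cs[i], cs[i+1], cs[i+2]] := hc
        simp only [List.cons.injEq, and_true] at this
        exact he ⟨this.2.1, this.2.2⟩), if_neg he]
      have ih := loopA_eq_trip cs (i + 1)
      rw [show ((i : Int) + 1) = ((i + 1 : Nat) : Int) by push_cast; ring, ih, hdrop1]
  · rw [PySem.List.pyRange_one_eq_nil (by omega)]
    have : (cs.drop i).length < 3 := by
      simp only [List.length_drop]; omega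
    rw [trip_short _ this]
    rfl
termination_by cs.length - i

-- ===== VERDICT (by name: the statement is the Claim_ definition above) =====
theorem is_key_spec : Claim_equal_is_key := by
  intro key _
  unfold Spec_is_key is_key is_key_alt
  have hA := loopA_eq_trip key.toList 0
  simp only [Nat.cast_zero, List.drop_zero] at hA
  have hlen : PySem.Str.len key - 2 = (key.toList.length : Int) - 2 := by
    simp [PySem.Str.len_eq]
  rw [hlen, hA, ← runsB_find_eq_trip]
  cases (runsB key.toList).find? (fun r => decide (3 ≤ r.2)) <;> rfl
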